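-- pv_equiv track=rewrite | github.com/young0805/Algorithm | 백준/Bronze/2798. 블랙잭/블랙잭.py | blackjack_best_sum
-- ===== SOURCE A (Python) =====
-- from itertools import combinations
--
-- def blackjack_best_sum(N, M, cards):
--
--     closest_sum = 0
--     for combo in combinations(cards, 3):
--         current_sum = sum(combo)
--         if closest_sum < current_sum <= M:
--             closest_sum = current_sum
--         if closest_sum == M:
--             break
--     return closest_sum
-- ===== SOURCE B (Python) =====
-- def blackjack_best_sum(N, M, cards):
--     a = sorted(cards)
--     n = len(a)
--     best = 0
--     for i in range(n - 2):
--         lo, hi = i + 1, n - 1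
--         while lo < hi:
--             s = a[i] + a[lo] + a[hi]
--             if s <= M:
--                 best = max(best, s)
--                 lo += 1
--             else:
--                 hi -= 1
--     return best
-- ===== Notes on version B (the rewrite author's own statement) =====
-- stated objective: faster
-- what changed: replaced the O(n^3) scan of all 3-card combinations with sort + fix-one-card + two pointers, O(n^2)
import Mathlib
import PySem

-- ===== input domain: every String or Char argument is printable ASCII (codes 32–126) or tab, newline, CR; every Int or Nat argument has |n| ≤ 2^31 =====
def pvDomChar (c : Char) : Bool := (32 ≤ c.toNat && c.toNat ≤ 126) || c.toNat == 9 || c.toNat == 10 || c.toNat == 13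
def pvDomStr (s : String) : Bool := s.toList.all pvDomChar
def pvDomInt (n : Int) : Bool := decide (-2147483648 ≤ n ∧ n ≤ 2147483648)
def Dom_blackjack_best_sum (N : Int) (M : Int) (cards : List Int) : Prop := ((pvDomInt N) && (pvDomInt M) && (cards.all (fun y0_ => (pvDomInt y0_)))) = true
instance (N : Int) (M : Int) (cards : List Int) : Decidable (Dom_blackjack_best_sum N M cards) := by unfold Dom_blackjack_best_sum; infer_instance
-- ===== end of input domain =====

-- B replaces A's scan of all 3-card combinations by sort + fix one card + two pointers (objective: faster).

-- ===== PORT A =====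
-- itertools.combinations(cards, 2) / (cards, 3) as lists, in itertools' order
def pvCombos2 : List Int → List (List Int)
  | [] => []
  | x :: xs => (xs.map (fun y => [x, y])) ++ pvCombos2 xs

def pvCombos3 : List Int → List (List Int)
  | [] => []
  | x :: xs => ((pvCombos2 xs).map (fun c => x :: c)) ++ pvCombos3 xs

-- A's for-loop over the combinations, including the 'break' once closest_sum == M
def pvLoopA (M : Int) : List (List Int) → Int → Int
  | [], c => c
  | combo :: rest, c =>
    let s := combo.sum
    let c' := if c < s ∧ s ≤ M then s else c
    if c' = M then c' else pvLoopA M rest c'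

def blackjack_best_sum (N : Int) (M : Int) (cards : List Int) : Int :=
  pvLoopA M (pvCombos3 cards) 0

-- ===== PORT B =====
-- the inner two-pointer while-loop of B (s = a[i] + a[lo] + a[hi] inlined)
def pvTP (M : Int) (a : List Int) (x : Int) (lo hi : Nat) (best : Int) : Int :=
  if _h : lo < hi then
    if x + a.getD lo 0 + a.getD hi 0 ≤ M then
      pvTP M a x (lo + 1) hi (max best (x + a.getD lo 0 + a.getD hi 0))
    else pvTP M a x lo (hi - 1) best
  else best
termination_by hi - lo
decreasing_by all_goals omega

def blackjack_best_sum_alt (N : Int) (M : Int) (cards : List Int) : Int :=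
  let a := PySem.List.sorted cards (fun x => x) false
  let n := a.length
  (List.range (n - 2)).foldl (fun best i => pvTP M a (a.getD i 0) (i + 1) (n - 1) best) 0

-- ===== PRECONDITION & SPEC =====
def Spec_blackjack_best_sum (N : Int) (M : Int) (cards : List Int) (out : Int) : Prop := out = blackjack_best_sum_alt N M cards
instance (N : Int) (M : Int) (cards : List Int) (out : Int) : Decidable (Spec_blackjack_best_sum N M cards out) := by unfold Spec_blackjack_best_sum; infer_instance

-- ===== CLAIM (what is proved, stated in full; the proofs are below) =====
def Claim_equal_blackjack_best_sum : Prop := ∀ (N : Int) (M : Int) (cards : List Int), Dom_blackjack_best_sum N M cards → Spec_blackjack_best_sum N M cards (blackjack_best_sum N M cards)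

-- ===== LEMMAS AND PROOFS =====

-- the order-insensitive "clamped max" step and fold both programs compute
def pvStep (M b s : Int) : Int := if s ≤ M then max b s else b

def pvF (M : Int) (L : List Int) (b : Int) : Int := L.foldl (pvStep M) b

lemma pvStep_comm (M b s t : Int) : pvStep M (pvStep M b s) t = pvStep M (pvStep M b t) s := by
  simp only [pvStep]; split_ifs <;> omega

lemma pvF_append (M : Int) (L1 L2 : List Int) (b : Int) :
    pvF M (L1 ++ L2) b = pvF M L2 (pvF M L1 b) := List.foldl_append

lemma pvF_perm (M : Int) {L L' : List Int} (h : L.Perm L') :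
    ∀ b, pvF M L b = pvF M L' b := by
  induction h with
  | nil => intro b; rfl
  | cons x _ ih => intro b; simp only [pvF, List.foldl_cons] at *; exact ih _
  | swap x y l => intro b; simp only [pvF, List.foldl_cons]; rw [pvStep_comm]
  | trans _ _ ih1 ih2 => intro b; rw [ih1, ih2]

lemma pvF_M_fixed (M : Int) (L : List Int) : pvF M L M = M := by
  induction L with
  | nil => rfl
  | cons s L ih =>
    simp only [pvF, List.foldl_cons]
    have h : pvStep M M s = M := by simp only [pvStep]; split_ifs <;> omega
    rw [h]; exact ih

lemma pvF_le_fixed (M : Int) (L : List Int) (b : Int) (h : ∀ t ∈ L, t ≤ b) : pvF M L b = b := by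
  induction L with
  | nil => rfl
  | cons s L ih =>
    simp only [pvF, List.foldl_cons]
    have hs : pvStep M b s = b := by
      have := h s (by simp); simp only [pvStep]; split_ifs <;> omega
    rw [hs]; exact ih fun t ht => h t (by simp [ht])

lemma pvF_all_gt (M : Int) (L : List Int) (b : Int) (h : ∀ t ∈ L, M < t) : pvF M L b = b := by
  induction L with
  | nil => rfl
  | cons s L ih =>
    simp only [pvF, List.foldl_cons]
    have hs : pvStep M b s = b := by
      have := h s (by simp); simp only [pvStep]; split_ifs <;> omega
    rw [hs]; exact ih fun t ht => h t (by simp [ht])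

lemma pvF_block_max (M : Int) (L : List Int) (s : Int) (hmem : s ∈ L) (hM : s ≤ M)
    (hle : ∀ t ∈ L, t ≤ s) : ∀ b, pvF M L b = max b s := by
  induction L with
  | nil => cases hmem
  | cons t L ih =>
    intro b
    simp only [pvF, List.foldl_cons]
    by_cases hsl : s ∈ L
    · have hr := ih hsl (fun u hu => hle u (by simp [hu])) (pvStep M b t)
      have ht : t ≤ s := hle t (by simp)
      rw [show (List.foldl (pvStep M) (pvStep M b t) L) = pvF M L (pvStep M b t) from rfl, hr]
      simp only [pvStep]; split_ifs <;> omega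
    · have hst : s = t := by
        rcases List.mem_cons.1 hmem with h | h
        · exact h
        · exact absurd h hsl
      subst hst
      have hstep : pvStep M b s = max b s := by simp only [pvStep]; split_ifs <;> omega
      rw [hstep]
      exact pvF_le_fixed M L (max b s) fun u hu =>
        le_trans (hle u (by simp [hu])) (le_max_right b s)

-- ===== A side: A's loop is the clamped-max fold over the combination sums =====

lemma pvLoopA_eq_pvF (M : Int) (C : List (List Int)) :
    ∀ c, pvLoopA M C c = pvF M (C.map List.sum) c := by
  induction C with
  | nil => intro c; rfl
  | cons combo rest ih =>
    intro c
    simp only [pvLoopA, List.map_cons, pvF, List.foldl_cons]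
    have hstep : (if c < combo.sum ∧ combo.sum ≤ M then combo.sum else c) = pvStep M c combo.sum := by
      simp only [pvStep]; split_ifs <;> omega
    rw [hstep]
    split_ifs with hbrk
    · rw [hbrk]; exact (pvF_M_fixed M _).symm
    · exact ih _

-- structural triple/pair sums (the multiset both sides fold over)
def pvPairs : List Int → List Int
  | [] => []
  | x :: xs => xs.map (fun y => x + y) ++ pvPairs xs

def pvSums3 : List Int → List Int
  | [] => []
  | x :: xs => (pvPairs xs).map (fun y => x + y) ++ pvSums3 xs

lemma pvCombos2_sum (l : List Int) : (pvCombos2 l).map List.sum = pvPairs l := by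
  induction l with
  | nil => rfl
  | cons x xs ih =>
    simp only [pvCombos2, pvPairs, List.map_append, List.map_map, ih]
    congr 1
    apply List.map_congr_left
    intro y _
    simp

lemma pvCombos3_sum (l : List Int) : (pvCombos3 l).map List.sum = pvSums3 l := by
  induction l with
  | nil => rfl
  | cons x xs ih =>
    simp only [pvCombos3, pvSums3, List.map_append, List.map_map, ih]
    congr 1
    rw [← pvCombos2_sum, List.map_map]
    apply List.map_congr_left
    intro c _
    simp

-- permutation invariance of the sums multiset
lemma pvAppend_middle_perm {α : Type} (A B C : List α) : (A ++ (B ++ C)).Perm (B ++ (A ++ C)) := by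
  rw [← List.append_assoc, ← List.append_assoc]
  exact List.Perm.append_right C List.perm_append_comm

lemma pvPairs_perm {l l' : List Int} (h : l.Perm l') : (pvPairs l).Perm (pvPairs l') := by
  induction h with
  | nil => exact List.Perm.refl _
  | cons x h ih => exact List.Perm.append (h.map _) ih
  | swap x y l =>
    simp only [pvPairs, List.map_cons, List.cons_append]
    rw [Int.add_comm y x]
    exact List.Perm.cons _ (pvAppend_middle_perm _ _ _)
  | trans _ _ ih1 ih2 => exact ih1.trans ih2

lemma pvSums3_perm {l l' : List Int} (h : l.Perm l') : (pvSums3 l).Perm (pvSums3 l') := by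
  induction h with
  | nil => exact List.Perm.refl _
  | cons x h ih => exact List.Perm.append ((pvPairs_perm h).map _) ih
  | swap x y l =>
    simp only [pvSums3, pvPairs, List.map_append, List.map_map, List.append_assoc]
    have hmap : (l.map ((fun z => y + z) ∘ fun z => x + z)) = (l.map ((fun z => x + z) ∘ fun z => y + z)) := by
      apply List.map_congr_left; intro z _; simp; ring
    rw [hmap]
    exact List.Perm.append_left _ (pvAppend_middle_perm _ _ _)
  | trans _ _ ih1 ih2 => exact ih1.trans ih2

lemma pvSums3_short (l : List Int) (h : l.length ≤ 2) : pvSums3 l = [] := by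
  match l with
  | [] => rfl
  | [x] => rfl
  | [x, y] => rfl
  | x :: y :: z :: r => simp at h

-- ===== B side =====

lemma pvGetD_mono {a : List Int} (hs : a.Pairwise (· ≤ ·)) {i j : Nat} (hij : i ≤ j)
    (hj : j < a.length) : a.getD i 0 ≤ a.getD j 0 := by
  have hi : i < a.length := lt_of_le_of_lt hij hj
  rw [List.getD_eq_getElem a 0 hi, List.getD_eq_getElem a 0 hj]
  rcases Nat.lt_or_ge i j with h | h
  · exact (List.pairwise_iff_getElem.1 hs) i j hi hj h
  · have hij' : i = j := le_antisymm hij h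
    subst hij'; exact le_refl _

-- the pair-sum window the two-pointer loop ranges over
def pvWin (a : List Int) (x : Int) (lo hi : Nat) : List Int :=
  (List.range' lo (hi - lo)).flatMap
    (fun l => (List.range' (l + 1) (hi - l)).map (fun r => x + a.getD l 0 + a.getD r 0))

lemma pvFlatMap_congr {α β : Type} {L : List α} {f g : α → List β}
    (h : ∀ l ∈ L, f l = g l) : L.flatMap f = L.flatMap g := by
  induction L with
  | nil => rfl
  | cons a L ih =>
    simp only [List.flatMap_cons]
    rw [h a (by simp), ih fun l hl => h l (by simp [hl])]

lemma pvFlatMap_snoc_perm {α β : Type} (f : α → List β) (g : α → β) (L : List α) :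
    (L.flatMap (fun l => f l ++ [g l])).Perm (L.flatMap f ++ L.map g) := by
  induction L with
  | nil => exact List.Perm.refl _
  | cons a L ih =>
    simp only [List.flatMap_cons, List.map_cons, List.append_assoc]
    refine List.Perm.append_left (f a) ?_
    have h1 : ([g a] ++ L.flatMap fun l => f l ++ [g l]).Perm ([g a] ++ (L.flatMap f ++ L.map g)) :=
      List.Perm.append_left _ ih
    refine h1.trans ?_
    have h2 : ([g a] ++ (L.flatMap f ++ L.map g)) = g a :: (L.flatMap f ++ L.map g) := rfl
    rw [h2]
    exact List.perm_middle.symm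

lemma pvTP_spec (M x : Int) (a : List Int) (hs : a.Pairwise (· ≤ ·)) :
    ∀ (k lo hi : Nat), hi - lo ≤ k → hi < a.length → ∀ b,
      pvTP M a x lo hi b = pvF M (pvWin a x lo hi) b := by
  intro k
  induction k with
  | zero =>
    intro lo hi hk hhi b
    have hle : ¬ lo < hi := by omega
    rw [pvTP, dif_neg hle]
    have h0 : hi - lo = 0 := by omega
    simp [pvWin, h0, pvF]
  | succ k ih =>
    intro lo hi hk hhi b
    by_cases hlt : lo < hi
    · rw [pvTP, dif_pos hlt]
      by_cases hsM : x + a.getD lo 0 + a.getD hi 0 ≤ M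
      · rw [if_pos hsM]
        have hsplit : pvWin a x lo hi =
            ((List.range' (lo + 1) (hi - lo)).map (fun r => x + a.getD lo 0 + a.getD r 0))
              ++ pvWin a x (lo + 1) hi := by
          simp only [pvWin]
          have h1 : hi - lo = (hi - (lo + 1)) + 1 := by omega
          rw [h1, List.range'_succ]
          simp only [List.flatMap_cons]
          rw [h1]
        rw [hsplit, pvF_append]
        have hblock : pvF M ((List.range' (lo + 1) (hi - lo)).map
            (fun r => x + a.getD lo 0 + a.getD r 0)) b = max b (x + a.getD lo 0 + a.getD hi 0) := by
          apply pvF_block_max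
          · rw [List.mem_map]
            exact ⟨hi, by rw [List.mem_range'_1]; omega, rfl⟩
          · exact hsM
          · intro t ht
            rw [List.mem_map] at ht
            obtain ⟨r, hr, rfl⟩ := ht
            rw [List.mem_range'_1] at hr
            have := pvGetD_mono hs (show r ≤ hi by omega) hhi
            omega
        rw [hblock]
        exact ih (lo + 1) hi (by omega) hhi (max b (x + a.getD lo 0 + a.getD hi 0))
      · rw [if_neg hsM]
        -- peel off the r = hi column, all of whose sums exceed M
        have hcol : pvWin a x lo hi =
            (List.range' lo (hi - lo)).flatMap (fun l =>
              ((List.range' (l + 1) ((hi - 1) - l)).map (fun r => x + a.getD l 0 + a.getD r 0))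
                ++ [x + a.getD l 0 + a.getD hi 0]) := by
          simp only [pvWin]
          apply pvFlatMap_congr
          intro l hl
          rw [List.mem_range'_1] at hl
          have h1 : hi - l = ((hi - 1) - l) + 1 := by omega
          rw [h1, List.range'_1_concat, List.map_append]
          congr 2
          simp only [List.map_cons, List.map_nil]
          congr 3
          omega
        have hperm : (pvWin a x lo hi).Perm
            (pvWin a x lo (hi - 1) ++
              (List.range' lo (hi - lo)).map (fun l => x + a.getD l 0 + a.getD hi 0)) := by
          rw [hcol]
          refine (pvFlatMap_snoc_perm _ _ _).trans ?_
          refine List.Perm.append_right _ (List.Perm.of_eq ?_)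
          have h2 : hi - lo = ((hi - 1) - lo) + 1 := by omega
          rw [h2, List.range'_1_concat, List.flatMap_append]
          have h3 : lo + ((hi - 1) - lo) = hi - 1 := by omega
          rw [h3]
          simp only [List.flatMap_cons, List.flatMap_nil]
          have h4 : (hi - 1) - (hi - 1) = 0 := by omega
          rw [h4]
          simp [pvWin]
        rw [pvF_perm M hperm b, pvF_append]
        have htail : pvF M ((List.range' lo (hi - lo)).map
            (fun l => x + a.getD l 0 + a.getD hi 0)) (pvF M (pvWin a x lo (hi - 1)) b)
            = pvF M (pvWin a x lo (hi - 1)) b := by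
          apply pvF_all_gt
          intro t ht
          rw [List.mem_map] at ht
          obtain ⟨l, hl, rfl⟩ := ht
          rw [List.mem_range'_1] at hl
          have := pvGetD_mono hs (show lo ≤ l by omega) (show l < a.length by omega)
          omega
        rw [htail]
        exact ih lo (hi - 1) (by omega) (by omega) b
    · rw [pvTP, dif_neg hlt]
      have h0 : hi - lo = 0 := by omega
      simp [pvWin, h0, pvF]

-- indices back to structure: a window of getD reads is a drop of the list
lemma pvMap_getD_range' (a : List Int) :
    ∀ (k d : Nat), d + k = a.length →
      (List.range' d k).map (fun r => a.getD r 0) = a.drop d := by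
  intro k
  induction k with
  | zero =>
    intro d hd
    rw [List.drop_of_length_le (by omega)]
    rfl
  | succ k ih =>
    intro d hd
    have hdl : d < a.length := by omega
    rw [List.range'_succ, List.map_cons, List.getD_eq_getElem a 0 hdl,
        List.drop_eq_getElem_cons hdl, ih (d + 1) (by omega)]

lemma pvWin_eq (a : List Int) (x : Int) :
    ∀ (k d : Nat), d + k = a.length →
      pvWin a x d (a.length - 1) = (pvPairs (a.drop d)).map (fun y => x + y) := by
  intro k
  induction k with
  | zero =>
    intro d hd
    have h0 : a.length - 1 - d = 0 := by omega
    rw [List.drop_of_length_le (by omega)]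
    simp [pvWin, h0, pvPairs]
  | succ k ih =>
    intro d hd
    by_cases hk : a.length - 1 - d = 0
    · -- at most one element left: no pairs
      have hlen : (a.drop d).length ≤ 1 := by
        rw [List.length_drop]; omega
      rcases hdrop : a.drop d with _ | ⟨y, _ | ⟨z, r⟩⟩
      · simp [pvWin, hk, pvPairs]
      · simp [pvWin, hk, pvPairs]
      · rw [hdrop] at hlen; simp at hlen
    · have hdl : d < a.length := by omega
      have hlen2 : d + 2 ≤ a.length := by omega
      have hsplit : pvWin a x d (a.length - 1) =
          ((List.range' (d + 1) (a.length - (d + 1))).map (fun r => x + a.getD d 0 + a.getD r 0))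
            ++ pvWin a x (d + 1) (a.length - 1) := by
        simp only [pvWin]
        have h1 : a.length - 1 - d = (a.length - 1 - (d + 1)) + 1 := by omega
        rw [h1, List.range'_succ]
        simp only [List.flatMap_cons]
        rw [show a.length - 1 - d = a.length - (d + 1) from by omega]
      rw [hsplit, ih (d + 1) (by omega)]
      rw [List.drop_eq_getElem_cons hdl]
      simp only [pvPairs, List.map_append, List.map_map]
      congr 1
      rw [← pvMap_getD_range' a (a.length - (d + 1)) (d + 1) (by omega), List.map_map]
      apply List.map_congr_left
      intro r _
      simp only [Function.comp_apply]
      rw [List.getD_eq_getElem a 0 hdl]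
      ring

-- the outer for-loop of B folds the window spec over suffixes
lemma pvOuter (M : Int) (a : List Int) (hs : a.Pairwise (· ≤ ·)) :
    ∀ (k d : Nat) (b : Int), d + k = a.length - 2 →
      (List.range' d k).foldl (fun b i => pvTP M a (a.getD i 0) (i + 1) (a.length - 1) b) b
        = pvF M (pvSums3 (a.drop d)) b := by
  intro k
  induction k with
  | zero =>
    intro d b hd
    rw [pvSums3_short (a.drop d) (by rw [List.length_drop]; omega)]
    rfl
  | succ k ih =>
    intro d b hd
    have hdl : d < a.length := by omega
    rw [List.range'_succ, List.foldl_cons]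
    have hlen3 : 3 ≤ a.length := by omega
    have hstep : pvTP M a (a.getD d 0) (d + 1) (a.length - 1) b
        = pvF M ((pvPairs (a.drop (d + 1))).map (fun y => a.getD d 0 + y)) b := by
      rw [pvTP_spec M (a.getD d 0) a hs (a.length - 1 - (d + 1)) (d + 1) (a.length - 1)
            (le_refl _) (by omega) b,
          pvWin_eq a (a.getD d 0) (a.length - (d + 1)) (d + 1) (by omega)]
    rw [hstep, ih (d + 1) (pvF M ((pvPairs (a.drop (d + 1))).map (fun y => a.getD d 0 + y)) b) (by omega)]
    rw [List.drop_eq_getElem_cons hdl]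
    simp only [pvSums3]
    rw [pvF_append, List.getD_eq_getElem a 0 hdl]

-- ===== VERDICT (by name: the statement is the Claim_ definition above) =====
theorem blackjack_best_sum_spec : Claim_equal_blackjack_best_sum := by
  intro N M cards _
  unfold Spec_blackjack_best_sum blackjack_best_sum blackjack_best_sum_alt
  dsimp only
  set a := PySem.List.sorted cards (fun x => x) false with ha
  have hs : a.Pairwise (· ≤ ·) := PySem.List.sorted_pairwise cards (fun x => x)
  rw [List.range_eq_range']
  rw [pvOuter M a hs (a.length - 2) 0 0 (by omega)]
  rw [List.drop_zero]
  rw [pvLoopA_eq_pvF, pvCombos3_sum, ha]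
  exact (pvF_perm M (pvSums3_perm (PySem.List.sorted_perm cards (fun x => x) false)) 0).symm
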